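-- pv_equiv track=rewrite | github.com/OctavianTocan/Pawrrtal-AI | backend/app/core/governance/bash_boundary.py | _split_command_chains
-- ===== SOURCE A (Python) =====
-- _COMMAND_SEPARATORS: frozenset[str] = frozenset({"&&", "||", ";", "|", "&"})
--
-- def _split_command_chains(tokens: list[str]) -> list[list[str]]:
--     """Split a flat token list on bash separators into per-command lists."""
--     chains: list[list[str]] = []
--     current: list[str] = []
--     for token in tokens:
--         if token in _COMMAND_SEPARATORS:
--             if current:
--                 chains.append(current)
--             current = []
--             continue
--         current.append(token)
--     if current:
--         chains.append(current)
--     return chains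
-- ===== SOURCE B (Python) =====
-- from itertools import groupby
--
-- _COMMAND_SEPARATORS: frozenset[str] = frozenset({"&&", "||", ";", "|", "&"})
--
--
-- def _split_command_chains(tokens: list[str]) -> list[list[str]]:
--     """Split a flat token list on bash separators into per-command lists."""
--     return [list(run) for is_sep, run in
--             groupby(tokens, key=lambda t: t in _COMMAND_SEPARATORS)
--             if not is_sep]
-- ===== Notes on version B (the rewrite author's own statement) =====
-- stated objective: idiomatic
-- what changed: Replaced the explicit accumulator/flush loop by itertools.groupby partitioning the token stream into maximal separator/non-separator runs and keeping the non-separator runs.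
import Mathlib
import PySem

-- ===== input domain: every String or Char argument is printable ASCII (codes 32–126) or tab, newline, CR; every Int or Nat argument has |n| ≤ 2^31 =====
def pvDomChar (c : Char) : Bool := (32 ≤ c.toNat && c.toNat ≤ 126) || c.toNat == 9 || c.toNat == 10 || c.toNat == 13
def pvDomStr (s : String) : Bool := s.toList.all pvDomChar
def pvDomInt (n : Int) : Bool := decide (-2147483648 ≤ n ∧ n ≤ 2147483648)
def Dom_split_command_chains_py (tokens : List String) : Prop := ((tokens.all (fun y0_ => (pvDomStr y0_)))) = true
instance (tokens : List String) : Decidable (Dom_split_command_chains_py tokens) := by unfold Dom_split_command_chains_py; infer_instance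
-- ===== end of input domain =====

-- B replaces A's accumulator/flush loop by grouping the stream into maximal
-- separator/non-separator runs (itertools.groupby) and keeping the non-separator runs;
-- objective: idiomatic, same O(n) cost.

-- ===== PORT A =====
-- membership test 'token in _COMMAND_SEPARATORS'
def pvIsSep (t : String) : Bool := ["&&", "||", ";", "|", "&"].contains t

-- the for-loop over tokens with state (chains, current), then the final flush
def split_command_chains_py (tokens : List String) : List (List String) :=
  let s := tokens.foldl
    (fun (st : List (List String) × List String) token =>
      if pvIsSep token then
        (if st.2 = [] then st.1 else st.1 ++ [st.2], [])
      else
        (st.1, st.2 ++ [token]))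
    ([], [])
  if s.2 = [] then s.1 else s.1 ++ [s.2]

-- ===== PORT B =====
-- groupby: at each step consume one maximal run; separator runs are dropped,
-- non-separator runs become one chain.
def split_command_chains_py_alt (tokens : List String) : List (List String) :=
  match tokens with
  | [] => []
  | t :: ts =>
    if pvIsSep t then
      split_command_chains_py_alt (ts.dropWhile pvIsSep)
    else
      (t :: ts.takeWhile (fun x => ¬ pvIsSep x)) ::
        split_command_chains_py_alt (ts.dropWhile (fun x => ¬ pvIsSep x))
termination_by tokens.length
decreasing_by
  · exact Nat.lt_succ_of_le (ts.length_dropWhile_le _)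
  · exact Nat.lt_succ_of_le (ts.length_dropWhile_le _)

-- ===== PRECONDITION & SPEC =====
def Spec_split_command_chains_py (tokens : List String) (out : List (List String)) : Prop := out = split_command_chains_py_alt tokens
instance (tokens : List String) (out : List (List String)) : Decidable (Spec_split_command_chains_py tokens out) := by unfold Spec_split_command_chains_py; infer_instance

-- ===== CLAIM (what is proved, stated in full; the proofs are below) =====
def Claim_equal_split_command_chains_py : Prop := ∀ (tokens : List String), Dom_split_command_chains_py tokens → Spec_split_command_chains_py tokens (split_command_chains_py tokens)

-- ===== LEMMAS AND PROOFS =====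

-- A's loop body and finalizer, named for the proofs
def pvStep (st : List (List String) × List String) (token : String) :
    List (List String) × List String :=
  if pvIsSep token then
    (if st.2 = [] then st.1 else st.1 ++ [st.2], [])
  else
    (st.1, st.2 ++ [token])

def pvRun (tokens : List String) (chains : List (List String)) (current : List String) :
    List (List String) :=
  let s := tokens.foldl pvStep (chains, current)
  if s.2 = [] then s.1 else s.1 ++ [s.2]

theorem pvRun_nil (chains : List (List String)) (current : List String) :
    pvRun [] chains current = if current = [] then chains else chains ++ [current] := rfl

theorem pvRun_cons (t : String) (ts : List String) (chains : List (List String))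
    (current : List String) :
    pvRun (t :: ts) chains current =
      if pvIsSep t then pvRun ts (if current = [] then chains else chains ++ [current]) []
      else pvRun ts chains (current ++ [t]) := by
  simp [pvRun, pvStep, List.foldl_cons]
  split_ifs <;> rfl

-- the accumulated chains factor out of A's loop
theorem pvRun_hom (ts : List String) (chains : List (List String)) (current : List String) :
    pvRun ts chains current = chains ++ pvRun ts [] current := by
  induction ts generalizing chains current with
  | nil => simp [pvRun_nil]; split_ifs <;> simp
  | cons t ts ih =>
    rw [pvRun_cons, pvRun_cons]
    split_ifs with hsep hc
    · subst hc; rw [ih, ih]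
    · simp only [List.nil_append]
      rw [ih (chains ++ [current]) [], ih [current] []]
      simp
    · exact ih _ _

theorem alt_dropWhile_sep (ts : List String) :
    split_command_chains_py_alt (ts.dropWhile pvIsSep) = split_command_chains_py_alt ts := by
  cases ts with
  | nil => rfl
  | cons t ts =>
    by_cases h : pvIsSep t
    · rw [List.dropWhile_cons_of_pos h]
      rw [show split_command_chains_py_alt (t :: ts)
            = split_command_chains_py_alt (ts.dropWhile pvIsSep) from by
        rw [split_command_chains_py_alt]; simp [h]]
    · rw [List.dropWhile_cons_of_neg h]

theorem alt_cons_sep (t : String) (ts : List String) (h : pvIsSep t = true) :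
    split_command_chains_py_alt (t :: ts) = split_command_chains_py_alt ts := by
  rw [show split_command_chains_py_alt (t :: ts)
        = split_command_chains_py_alt (ts.dropWhile pvIsSep) from by
      rw [split_command_chains_py_alt]; simp [h], alt_dropWhile_sep]

theorem alt_cons_nonsep (t : String) (ts : List String) (h : ¬ pvIsSep t = true) :
    split_command_chains_py_alt (t :: ts)
      = (t :: ts.takeWhile (fun x => ¬ pvIsSep x)) ::
          split_command_chains_py_alt (ts.dropWhile (fun x => ¬ pvIsSep x)) := by
  rw [split_command_chains_py_alt]; simp [h]

-- joint invariant: A's loop from empty current computes B; from nonempty current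
-- it glues current onto the leading non-separator run
theorem pvRun_spec (ts : List String) :
    pvRun ts [] [] = split_command_chains_py_alt ts ∧
    ∀ c : List String, c ≠ [] →
      pvRun ts [] c =
        (c ++ ts.takeWhile (fun x => ¬ pvIsSep x)) ::
          split_command_chains_py_alt (ts.dropWhile (fun x => ¬ pvIsSep x)) := by
  induction ts with
  | nil =>
    constructor
    · rw [split_command_chains_py_alt.eq_def]; rfl
    · intro c hc
      rw [split_command_chains_py_alt.eq_def]
      simp [pvRun_nil, hc]
  | cons t ts ih =>
    obtain ⟨ih0, ih1⟩ := ih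
    by_cases h : pvIsSep t
    · constructor
      · rw [pvRun_cons, if_pos h, if_pos rfl, ih0, alt_cons_sep t ts h]
      · intro c hc
        rw [pvRun_cons, if_pos h, if_neg hc, pvRun_hom, ih0]
        simp [h, alt_cons_sep t ts h]
    · constructor
      · rw [pvRun_cons, if_neg h, List.nil_append, ih1 [t] (by simp),
            alt_cons_nonsep t ts h]
        simp
      · intro c hc
        rw [pvRun_cons, if_neg h, ih1 (c ++ [t]) (by simp)]
        simp [h]

-- ===== VERDICT (by name: the statement is the Claim_ definition above) =====
theorem split_command_chains_py_spec : Claim_equal_split_command_chains_py := by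
  intro tokens _
  show split_command_chains_py tokens = split_command_chains_py_alt tokens
  exact (pvRun_spec tokens).1
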